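-- pv_equiv track=rewrite | github.com/martinhova01/advent-of-code | 25/10/main.py | get_num_presses
-- ===== SOURCE A (Python) =====
-- from collections import deque
--
-- def get_num_presses(goal: int, buttons: list[int]) -> int:
--
--     visited = set()
--     q = deque([(0, 0)])  # indicator, clicks
--
--     while q:
--
--         indicators, clicks = q.popleft()
--         if indicators in visited:
--             continue
--         visited.add(indicators)
--
--         if indicators == goal:
--             return clicks
--
--         for button in buttons:
--             next_indicators = indicators ^ button
--
--             q.append((next_indicators, clicks + 1))
-- ===== SOURCE B (Python) =====
-- def get_num_presses(goal: int, buttons: list[int]) -> int: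
--     # Layered (frontier-set) BFS: expand whole distance-levels at once instead of
--     # a FIFO queue of (state, clicks) pairs; clicks is the current level number.
--     visited = set()
--     frontier = {0}
--     clicks = 0
--     while frontier:
--         if goal in frontier:
--             return clicks
--         visited |= frontier
--         frontier = {f ^ b for f in frontier for b in buttons} - visited
--         clicks += 1
-- ===== Notes on version B (the rewrite author's own statement) =====
-- stated objective: alternative
-- what changed: A's FIFO queue of (state, clicks) pairs with a per-pop visited check is replaced by a layered BFS that expands one deduplicated frontier SET per clicks level via set union/difference, so clicks is the loop counter and no (state, clicks) tuples or duplicate queue entries exist.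
-- outside the precondition, e.g. on get_num_presses(1, [2]): A returns None, B returns None
import Mathlib
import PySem

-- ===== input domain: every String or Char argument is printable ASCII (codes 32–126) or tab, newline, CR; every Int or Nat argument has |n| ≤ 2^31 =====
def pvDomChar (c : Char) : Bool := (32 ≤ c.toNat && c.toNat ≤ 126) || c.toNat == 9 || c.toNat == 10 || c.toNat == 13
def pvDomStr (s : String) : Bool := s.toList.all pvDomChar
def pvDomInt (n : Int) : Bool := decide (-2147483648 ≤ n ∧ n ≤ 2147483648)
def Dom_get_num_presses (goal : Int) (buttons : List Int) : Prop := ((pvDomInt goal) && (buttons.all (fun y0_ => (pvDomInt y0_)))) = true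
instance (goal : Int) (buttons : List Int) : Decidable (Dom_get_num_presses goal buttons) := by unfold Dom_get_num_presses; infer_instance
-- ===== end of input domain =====

-- B replaces A's FIFO queue of (state, clicks) pairs by a layered BFS over frontier SETS
-- (one set union/difference per distance level); same return value ("alternative", no speed claim).

-- ===== PORT A =====
-- A's BFS loop: queue of (indicators, clicks) pairs, visited set. The Nat argument is a
-- fuel guard making the recursion structural; it is large enough that it never expires
-- on Dom (the loop pops at most 1 + len(buttons) * 2^33 entries: every enqueue stems from
-- a newly visited value and all values stay in [-2^32, 2^32)). On an empty queue Python
-- falls out of the loop and returns None; the port returns -1 there (outside Pre_).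
def bfsA (goal : Int) (buttons : List Int) : PySem.Set Int → List (Int × Int) → Nat → Int
  | _, _, 0 => -1
  | _, [], _+1 => -1
  | V, (ind, c) :: q, fuel+1 =>
    if PySem.Set.contains V ind then bfsA goal buttons V q fuel
    else if ind = goal then c   -- visited.add(indicators) is dead on this return path
    else bfsA goal buttons (PySem.Set.add V ind)
      (q ++ buttons.map (fun b => (PySem.Int.bxor ind b, c + 1))) fuel

def get_num_presses (goal : Int) (buttons : List Int) : Int :=
  bfsA goal buttons PySem.Set.empty [(0, 0)] (1 + buttons.length * 2 ^ 33)

-- ===== PORT B =====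
-- B's loop: whole frontier set per clicks level; fuel guard as above (at most 1 + 2^33
-- levels on Dom, since each level visits at least one new value of [-2^32, 2^32)).
-- On an empty frontier Python returns None; the port returns -1 there (outside Pre_).
def bfsB (goal : Int) (buttons : List Int) : PySem.Set Int → PySem.Set Int → Int → Nat → Int
  | _, _, _, 0 => -1
  | V, F, c, fuel+1 =>
    if F.isEmpty then -1
    else if PySem.Set.contains F goal then c
    else
      let V' := PySem.Set.update V F
      let F' := PySem.Set.diff (PySem.Set.ofList (F.flatMap (fun f => buttons.map (fun b => PySem.Int.bxor f b)))) V'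
      bfsB goal buttons V' F' (c + 1) fuel

def get_num_presses_alt (goal : Int) (buttons : List Int) : Int :=
  bfsB goal buttons PySem.Set.empty (PySem.Set.ofList [0]) 0 (1 + 2 ^ 33)

-- ===== PRECONDITION & SPEC =====
-- Pre_ excludes exactly the unreachable goals (no subset of buttons XORs to goal): there
-- Python A falls out of its loop and returns None, not an int (B does the same).
def Pre_get_num_presses (goal : Int) (buttons : List Int) : Prop :=
  ∃ s ∈ buttons.sublists, s.foldl PySem.Int.bxor 0 = goal
instance (goal : Int) (buttons : List Int) : Decidable (Pre_get_num_presses goal buttons) := by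
  unfold Pre_get_num_presses; infer_instance

def pvWitness_get_num_presses : Int × List Int := (3, [1, 2])

def Spec_get_num_presses (goal : Int) (buttons : List Int) (out : Int) : Prop := out = get_num_presses_alt goal buttons
instance (goal : Int) (buttons : List Int) (out : Int) : Decidable (Spec_get_num_presses goal buttons out) := by unfold Spec_get_num_presses; infer_instance

-- ===== CLAIM (what is proved, stated in full; the proofs are below) =====
def Claim_equal_get_num_presses : Prop := ∀ (goal : Int) (buttons : List Int), Dom_get_num_presses goal buttons → Pre_get_num_presses goal buttons → Spec_get_num_presses goal buttons (get_num_presses goal buttons)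

-- ===== LEMMAS AND PROOFS =====

-- ghost helper: effect of processing one whole queue layer of A (first component: the
-- visited set after the layer; second: the values newly visited, in processing order)
def scanL (V : PySem.Set Int) : List Int → PySem.Set Int × List Int
  | [] => (V, [])
  | x :: t =>
    if x ∈ V then scanL V t
    else
      let p := scanL (PySem.Set.add V x) t
      (p.1, x :: p.2)

theorem scanL_fst_mem (V : PySem.Set Int) (xs : List Int) (z : Int) :
    z ∈ (scanL V xs).1 ↔ z ∈ V ∨ z ∈ xs := by
  induction xs generalizing V with
  | nil => simp [scanL]
  | cons x t ih =>
    by_cases hx : x ∈ V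
    · rw [scanL, if_pos hx, ih]
      simp only [List.mem_cons]
      constructor
      · rintro (h | h)
        · exact Or.inl h
        · exact Or.inr (Or.inr h)
      · rintro (h | h | h)
        · exact Or.inl h
        · exact Or.inl (h ▸ hx)
        · exact Or.inr h
    · rw [scanL, if_neg hx]
      simp only [ih, PySem.Set.mem_add, List.mem_cons]
      tauto

theorem scanL_snd_mem (V : PySem.Set Int) (xs : List Int) (z : Int) :
    z ∈ (scanL V xs).2 ↔ z ∈ xs ∧ z ∉ V := by
  induction xs generalizing V with
  | nil => simp [scanL]
  | cons x t ih =>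
    by_cases hx : x ∈ V
    · rw [scanL, if_pos hx, ih]
      simp only [List.mem_cons]
      constructor
      · rintro ⟨h1, h2⟩
        exact ⟨Or.inr h1, h2⟩
      · rintro ⟨h1, h2⟩
        rcases h1 with h | h
        · exact absurd (h ▸ hx) h2
        · exact ⟨h, h2⟩
    · rw [scanL, if_neg hx]
      simp only [List.mem_cons, ih, PySem.Set.mem_add]
      constructor
      · rintro (h | ⟨h1, h2⟩)
        · exact ⟨Or.inl h, h ▸ hx⟩
        · rw [not_or] at h2
          exact ⟨Or.inr h1, h2.1⟩
      · rintro ⟨h1, h2⟩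
        rcases h1 with h | h
        · exact Or.inl h
        · by_cases hzx : z = x
          · exact Or.inl hzx
          · exact Or.inr ⟨h, by rw [not_or]; exact ⟨h2, hzx⟩⟩

theorem scanL_snd_nodup (V : PySem.Set Int) (xs : List Int) : (scanL V xs).2.Nodup := by
  induction xs generalizing V with
  | nil => simp [scanL]
  | cons x t ih =>
    by_cases hx : x ∈ V
    · rw [scanL, if_pos hx]; exact ih V
    · rw [scanL, if_neg hx]
      refine List.nodup_cons.2 ⟨fun h => ?_, ih _⟩
      have h1 := (scanL_snd_mem _ _ _).1 h
      exact h1.2 ((PySem.Set.mem_add _ _ _).2 (Or.inr rfl))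

-- A, at a layer whose unvisited part does not contain the goal: the layer drains,
-- consuming exactly its length of fuel, leaving the next layer's queue
theorem bfsA_layer (goal : Int) (buttons : List Int) (xs : List Int) (V : PySem.Set Int)
    (ys : List Int) (c : Int) (fuel : Nat)
    (hfuel : xs.length ≤ fuel) (hg : goal ∈ xs → goal ∈ V) :
    bfsA goal buttons V (xs.map (fun x => (x, c)) ++ ys.map (fun y => (y, c + 1))) fuel
      = bfsA goal buttons (scanL V xs).1
          ((ys ++ (scanL V xs).2.flatMap (fun x => buttons.map (PySem.Int.bxor x))).map
            (fun y => (y, c + 1)))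
          (fuel - xs.length) := by
  induction xs generalizing V ys fuel with
  | nil => simp [scanL]
  | cons x t ih =>
    cases fuel with
    | zero => simp at hfuel
    | succ f =>
      have hf' : t.length ≤ f := by simp at hfuel; omega
      have hfe : f + 1 - (x :: t).length = f - t.length := by simp [Nat.succ_sub_succ]
      by_cases hx : x ∈ V
      · have hc : PySem.Set.contains V x = true := (PySem.Set.contains_iff _ _).2 hx
        simp only [List.map_cons, List.cons_append, bfsA, hc, if_true]
        rw [ih V ys f hf' (fun h => hg (List.mem_cons_of_mem _ h))]
        rw [hfe, scanL, if_pos hx]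
      · have hc : PySem.Set.contains V x = false := by
          rw [Bool.eq_false_iff]
          exact fun h => hx ((PySem.Set.contains_iff _ _).1 h)
        have hxg : ¬ (x = goal) := by
          intro h; subst h; exact hx (hg (by simp))
        simp only [List.map_cons, List.cons_append, bfsA, hc, Bool.false_eq_true, if_false,
          if_neg hxg]
        have hq : (t.map (fun x => (x, c)) ++ ys.map (fun y => (y, c + 1)))
              ++ buttons.map (fun b => (PySem.Int.bxor x b, c + 1))
            = t.map (fun x => (x, c))
              ++ (ys ++ buttons.map (PySem.Int.bxor x)).map (fun y => (y, c + 1)) := by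
          simp [List.map_map, Function.comp_def]
        rw [hq, ih (PySem.Set.add V x) (ys ++ buttons.map (PySem.Int.bxor x)) f hf'
          (fun h => (PySem.Set.mem_add _ _ _).2 (Or.inl (hg (List.mem_cons_of_mem _ h))))]
        rw [hfe, scanL, if_neg hx]
        simp [List.flatMap_cons, List.append_assoc]

-- A, at a layer whose unvisited part contains the goal: it returns the layer's clicks
theorem bfsA_found (goal : Int) (buttons : List Int) (xs : List Int) (V : PySem.Set Int)
    (rest : List (Int × Int)) (c : Int) (fuel : Nat)
    (hfuel : xs.length ≤ fuel) (hg : goal ∈ xs) (hgv : goal ∉ V) :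
    bfsA goal buttons V (xs.map (fun x => (x, c)) ++ rest) fuel = c := by
  induction xs generalizing V rest fuel with
  | nil => simp at hg
  | cons x t ih =>
    cases fuel with
    | zero => simp at hfuel
    | succ f =>
      have hf' : t.length ≤ f := by simp at hfuel; omega
      by_cases hx : x ∈ V
      · have hc : PySem.Set.contains V x = true := (PySem.Set.contains_iff _ _).2 hx
        have hxg : goal ∈ t := by
          rcases List.mem_cons.1 hg with h | h
          · exact absurd (h ▸ hx) hgv
          · exact h
        simp only [List.map_cons, List.cons_append, bfsA, hc, if_true]
        exact ih V rest f hf' hxg hgv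
      · have hc : PySem.Set.contains V x = false := by
          rw [Bool.eq_false_iff]
          exact fun h => hx ((PySem.Set.contains_iff _ _).1 h)
        by_cases hxg : x = goal
        · simp only [List.map_cons, List.cons_append, bfsA, hc, Bool.false_eq_true, if_false,
            if_pos hxg]
        · have hgt : goal ∈ t := by
            rcases List.mem_cons.1 hg with h | h
            · exact absurd h.symm hxg
            · exact h
          simp only [List.map_cons, List.cons_append, bfsA, hc, Bool.false_eq_true, if_false,
            if_neg hxg]
          rw [List.append_assoc]
          exact ih (PySem.Set.add V x) _ f hf' hgt
            (fun h => by
              rcases (PySem.Set.mem_add _ _ _).1 h with h | h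
              · exact hgv h
              · exact hxg h.symm)

theorem bfsA_nil (goal : Int) (buttons : List Int) (V : PySem.Set Int) (fuel : Nat) :
    bfsA goal buttons V [] fuel = -1 := by
  cases fuel <;> rfl

-- ghost potential: how many values of [-2^32, 2^32) are still unvisited
noncomputable def U (V : PySem.Set Int) : Nat :=
  ((Finset.Ico (-(2 ^ 32) : ℤ) (2 ^ 32)).filter (fun z => z ∉ V)).card

theorem U_le (V : PySem.Set Int) : U V ≤ 2 ^ 33 := by
  refine le_trans (Finset.card_filter_le _ _) ?_
  rw [Int.card_Ico]
  norm_num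

theorem U_scanL (V : PySem.Set Int) (xs : List Int)
    (hxs : ∀ z ∈ xs, -(2 ^ 32) ≤ z ∧ z < 2 ^ 32) :
    U (scanL V xs).1 + (scanL V xs).2.length = U V := by
  classical
  have hnd : (scanL V xs).2.Nodup := scanL_snd_nodup V xs
  have hsplit :
      (Finset.Ico (-(2 ^ 32) : ℤ) (2 ^ 32)).filter (fun z => z ∉ V)
        = ((Finset.Ico (-(2 ^ 32) : ℤ) (2 ^ 32)).filter (fun z => z ∉ (scanL V xs).1))
            ∪ (scanL V xs).2.toFinset := by
    ext z
    simp only [Finset.mem_union, Finset.mem_filter, List.mem_toFinset,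
      scanL_fst_mem, scanL_snd_mem]
    constructor
    · rintro ⟨hz, hzv⟩
      by_cases hzx : z ∈ xs
      · exact Or.inr ⟨hzx, hzv⟩
      · exact Or.inl ⟨hz, by rw [not_or]; exact ⟨hzv, hzx⟩⟩
    · rintro (⟨hz, hzv⟩ | ⟨hzx, hzv⟩)
      · rw [not_or] at hzv
        exact ⟨hz, hzv.1⟩
      · exact ⟨Finset.mem_Ico.2 (hxs z hzx), hzv⟩
  have hdisj :
      Disjoint ((Finset.Ico (-(2 ^ 32) : ℤ) (2 ^ 32)).filter (fun z => z ∉ (scanL V xs).1))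
        (scanL V xs).2.toFinset := by
    rw [Finset.disjoint_right]
    intro z hz hz'
    have h1 := List.mem_toFinset.1 hz
    rw [scanL_snd_mem] at h1
    have h2 := (Finset.mem_filter.1 hz').2
    exact h2 ((scanL_fst_mem _ _ _).2 (Or.inr h1.1))
  have hcard := congrArg Finset.card hsplit
  rw [Finset.card_union_of_disjoint hdisj, List.toFinset_card_of_nodup hnd] at hcard
  unfold U
  omega

theorem bxor_bound (x y : Int)
    (hx : -(2 ^ 32) ≤ x ∧ x < 2 ^ 32) (hy : -(2 ^ 32) ≤ y ∧ y < 2 ^ 32) :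
    -(2 ^ 32) ≤ PySem.Int.bxor x y ∧ PySem.Int.bxor x y < 2 ^ 32 := by
  unfold PySem.Int.bxor
  split_ifs with h1 h2 h2
  · have h : x.toNat ^^^ y.toNat < 2 ^ 32 := Nat.xor_lt_two_pow (by omega) (by omega)
    constructor <;> omega
  · have h : x.toNat ^^^ (-y - 1).toNat < 2 ^ 32 := Nat.xor_lt_two_pow (by omega) (by omega)
    constructor <;> omega
  · have h : (-x - 1).toNat ^^^ y.toNat < 2 ^ 32 := Nat.xor_lt_two_pow (by omega) (by omega)
    constructor <;> omega
  · have h : (-x - 1).toNat ^^^ (-y - 1).toNat < 2 ^ 32 :=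
      Nat.xor_lt_two_pow (by omega) (by omega)
    constructor <;> omega

theorem len_flatMap_map (l buttons : List Int) (f : Int → Int → Int) :
    (l.flatMap (fun x => buttons.map (f x))).length = l.length * buttons.length := by
  induction l with
  | nil => simp
  | cons x t ih => simp [List.flatMap_cons, ih, Nat.succ_mul, Nat.add_comm]

-- the joint simulation: A at the start of a layer equals B at the same clicks level
theorem bfs_sim (goal : Int) (buttons : List Int)
    (hb : ∀ b ∈ buttons, -(2 ^ 32) ≤ b ∧ b < 2 ^ 32) :
    ∀ (fB : Nat) (VA : PySem.Set Int) (xs : List Int) (VB F : PySem.Set Int) (c : Int)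
      (fA : Nat),
      (∀ z ∈ xs, -(2 ^ 32) ≤ z ∧ z < 2 ^ 32) →
      (∀ z : Int, z ∈ VA ↔ z ∈ VB) →
      (∀ z : Int, z ∈ F ↔ z ∈ xs ∧ z ∉ VA) →
      xs.length + buttons.length * U VA ≤ fA →
      U VA < fB →
      bfsA goal buttons VA (xs.map (fun x => (x, c))) fA = bfsB goal buttons VB F c fB := by
  intro fB
  induction fB with
  | zero => intro _ _ _ _ _ _ _ _ _ _ h; omega
  | succ fB ih =>
    intro VA xs VB F c fA hxs hV hF hfA hfB
    by_cases hFe : F = []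
    · -- frontier empty: both programs fall out of their loops
      have hnone : ∀ z ∈ xs, z ∈ VA := by
        intro z hz
        by_contra hzv
        have : z ∈ F := (hF z).2 ⟨hz, hzv⟩
        rw [hFe] at this
        simp at this
      have hsnd : (scanL VA xs).2 = [] := by
        rw [List.eq_nil_iff_forall_not_mem]
        intro z hz
        have h1 := (scanL_snd_mem _ _ _).1 hz
        exact h1.2 (hnone z h1.1)
      have hA : bfsA goal buttons VA (xs.map (fun x => (x, c))) fA = -1 := by
        have h := bfsA_layer goal buttons xs VA [] c fA (by omega) (fun h => hnone _ h)
        simp only [List.map_nil, List.append_nil] at h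
        rw [h, hsnd]
        simp [bfsA_nil]
      rw [hA, bfsB, hFe]
      simp
    · by_cases hFg : goal ∈ F
      · -- goal in the frontier: both return c
        have hg := (hF goal).1 hFg
        have hA : bfsA goal buttons VA (xs.map (fun x => (x, c))) fA = c := by
          have h := bfsA_found goal buttons xs VA [] c fA (by omega) hg.1 hg.2
          simpa using h
        have h1 : F.isEmpty = false := by
          cases F with
          | nil => exact absurd rfl hFe
          | cons a t => rfl
        rw [hA, bfsB]
        simp only [h1, Bool.false_eq_true, if_false]
        rw [if_pos ((PySem.Set.contains_iff _ _).2 hFg)]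
      · -- step one whole layer / level
        have hgv : goal ∈ xs → goal ∈ VA := by
          intro h
          by_contra hv
          exact hFg ((hF goal).2 ⟨h, hv⟩)
        have hA := bfsA_layer goal buttons xs VA [] c fA (by omega) hgv
        simp only [List.map_nil, List.append_nil, List.nil_append] at hA
        rw [hA]
        have h1 : F.isEmpty = false := by
          cases F with
          | nil => exact absurd rfl hFe
          | cons a t => rfl
        have h2 : PySem.Set.contains F goal = false := by
          rw [Bool.eq_false_iff]
          exact fun h => hFg ((PySem.Set.contains_iff _ _).1 h)
        have hBstep : bfsB goal buttons VB F c (fB + 1)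
            = bfsB goal buttons (PySem.Set.update VB F)
                (PySem.Set.diff
                  (PySem.Set.ofList (F.flatMap (fun f => buttons.map (fun b => PySem.Int.bxor f b))))
                  (PySem.Set.update VB F)) (c + 1) fB := by
          rw [bfsB]
          simp [h1]
          exact fun h => absurd h hFg
        rw [hBstep]
        have hlmem : ∀ z : Int, z ∈ (scanL VA xs).2 ↔ z ∈ xs ∧ z ∉ VA :=
          fun z => scanL_snd_mem VA xs z
        have hUeq : U (scanL VA xs).1 + (scanL VA xs).2.length = U VA := U_scanL VA xs hxs
        -- F nonempty: at least one value is newly visited in this layer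
        obtain ⟨w, hw⟩ := List.exists_mem_of_ne_nil F hFe
        have hwl : w ∈ (scanL VA xs).2 := (hlmem w).2 ((hF w).1 hw)
        have hlpos : 1 ≤ (scanL VA xs).2.length := List.length_pos_of_mem hwl
        -- visited sets stay in sync
        have hV' : ∀ z : Int, z ∈ (scanL VA xs).1 ↔ z ∈ PySem.Set.update VB F := by
          intro z
          have ha := scanL_fst_mem VA xs z
          have hb' := PySem.Set.mem_update (s := VB) (xs := F) (y := z)
          have hc' := hV z
          have hd := hF z
          rw [ha, hb']
          constructor
          · rintro (h | h)
            · exact Or.inl (hc'.1 h)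
            · by_cases hza : z ∈ VA
              · exact Or.inl (hc'.1 hza)
              · exact Or.inr (hd.2 ⟨h, hza⟩)
          · rintro (h | h)
            · exact Or.inl (hc'.2 h)
            · exact Or.inr (hd.1 h).1
        -- frontiers stay in sync
        have hF' : ∀ z : Int,
            z ∈ PySem.Set.diff
              (PySem.Set.ofList (F.flatMap (fun f => buttons.map (fun b => PySem.Int.bxor f b))))
              (PySem.Set.update VB F)
            ↔ z ∈ (scanL VA xs).2.flatMap (fun x => buttons.map (PySem.Int.bxor x))
                ∧ z ∉ (scanL VA xs).1 := by
          intro z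
          rw [PySem.Set.mem_diff, PySem.Set.mem_ofList]
          have hfl : z ∈ F.flatMap (fun f => buttons.map (fun b => PySem.Int.bxor f b))
              ↔ z ∈ (scanL VA xs).2.flatMap (fun x => buttons.map (PySem.Int.bxor x)) := by
            simp only [List.mem_flatMap, List.mem_map]
            constructor
            · rintro ⟨f, hf, b, hbb, rfl⟩
              exact ⟨f, (hlmem f).2 ((hF f).1 hf), b, hbb, rfl⟩
            · rintro ⟨f, hf, b, hbb, rfl⟩
              exact ⟨f, (hF f).2 ((hlmem f).1 hf), b, hbb, rfl⟩
          rw [hfl, not_congr (hV' z).symm]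
        apply ih (scanL VA xs).1 ((scanL VA xs).2.flatMap (fun x => buttons.map (PySem.Int.bxor x)))
          (PySem.Set.update VB F) _ (c + 1) (fA - xs.length)
        · intro z hz
          rw [List.mem_flatMap] at hz
          obtain ⟨x, hx, hz⟩ := hz
          rw [List.mem_map] at hz
          obtain ⟨b, hbb, rfl⟩ := hz
          exact bxor_bound x b (hxs x ((hlmem x).1 hx).1) (hb b hbb)
        · exact hV'
        · intro z
          rw [hF' z]
        · have hlen : ((scanL VA xs).2.flatMap (fun x => buttons.map (PySem.Int.bxor x))).length
              = (scanL VA xs).2.length * buttons.length := len_flatMap_map _ buttons _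
          have hmul : buttons.length * U (scanL VA xs).1
                + (scanL VA xs).2.length * buttons.length
              = buttons.length * U VA := by
            rw [Nat.mul_comm ((scanL VA xs).2.length), ← Nat.mul_add, hUeq]
          omega
        · omega

-- ===== VERDICT (by name: the statement is the Claim_ definition above) =====
theorem get_num_presses_spec : Claim_equal_get_num_presses := by
  intro goal buttons hDom hPre
  unfold Spec_get_num_presses get_num_presses get_num_presses_alt
  have hb : ∀ b ∈ buttons, -(2 ^ 32) ≤ b ∧ b < 2 ^ 32 := by
    intro b hbb
    unfold Dom_get_num_presses at hDom
    simp only [Bool.and_eq_true, List.all_eq_true] at hDom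
    have h := hDom.2 b hbb
    unfold pvDomInt at h
    simp only [decide_eq_true_eq] at h
    constructor <;> omega
  have h := bfs_sim goal buttons hb (1 + 2 ^ 33) PySem.Set.empty [0] PySem.Set.empty
    (PySem.Set.ofList [0]) 0 (1 + buttons.length * 2 ^ 33)
    (by intro z hz; simp at hz; subst hz; norm_num)
    (by intro z; simp [PySem.Set.empty])
    (by intro z; simp [PySem.Set.mem_ofList, PySem.Set.empty])
    (by
      have hU := U_le PySem.Set.empty
      have h2 : buttons.length * U PySem.Set.empty ≤ buttons.length * 2 ^ 33 :=
        Nat.mul_le_mul_left _ hU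
      simp only [List.length_cons, List.length_nil]
      omega)
    (by
      have hU := U_le PySem.Set.empty
      omega)
  simpa using h
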